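-- pv_equiv track=rewrite | github.com/EstevaoUyra/Hamming-Code-8-4 | algorithm.py | decode_hamming_8_4
-- ===== SOURCE A (Python) =====
-- def decode_hamming_8_4(received_code):
--     """
--     Decode an 8-bit (8, 4) Hamming code.
--
--     Parameters:
--     received_code (str): An 8-bit Hamming code.
--
--     Returns:
--     str: The corrected 4-bit data, or an error message if invalid input.
--     """
--     if len(received_code) != 8 or any(bit not in ['0', '1'] for bit in received_code):
--         return "Invalid code. Please provide 8 bits."
--
--     # Parity bit positions
--     parity_positions = [1, 2, 4, 8]
--
--     # Calculate syndrome
--     syndrome = ''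
--     for p in parity_positions:
--         parity = 0
--         for i in range(1, 9):
--             if (i & p) or i == p:
--                 parity ^= int(received_code[i-1])
--         syndrome = str(parity) + syndrome
--
--     # Detect and correct error
--     error_position = int(syndrome, 2)
--     if error_position != 0:
--         if error_position > 8:
--             return "Uncorrectable error detected"
--
--         corrected_code = list(received_code)
--         corrected_code[error_position - 1] = '1' if received_code[error_position - 1] == '0' else '0'
--         received_code = ''.join(corrected_code)
--
--     # Extract original data
--     data_positions = [3, 5, 6, 7]
--     original_data = ''.join(received_code[i-1] for i in data_positions)
--
--     return original_data
-- ===== SOURCE B (Python) =====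
-- def decode_hamming_8_4(received_code):
--     """Decode an 8-bit (8,4) Hamming code via the single-pass XOR-of-indices syndrome."""
--     if len(received_code) != 8 or any(bit not in '01' for bit in received_code):
--         return "Invalid code. Please provide 8 bits."
--     error_position = 0
--     for i, bit in enumerate(received_code, 1):
--         if bit == '1':
--             error_position ^= i
--     if error_position > 8:
--         return "Uncorrectable error detected"
--     bits = list(received_code)
--     if error_position:
--         bits[error_position - 1] = '0' if bits[error_position - 1] == '1' else '1'
--     return bits[2] + bits[4] + bits[5] + bits[6]
-- ===== Notes on version B (the rewrite author's own statement) =====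
-- stated objective: simpler
-- what changed: Replaces A's nested syndrome computation (four parity bits, each via an inner loop over all 8 positions, assembled into a binary string that is re-parsed with int(., 2)) by the classic single pass that XORs the 1-based index of every set bit into the error position.
import Mathlib
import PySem

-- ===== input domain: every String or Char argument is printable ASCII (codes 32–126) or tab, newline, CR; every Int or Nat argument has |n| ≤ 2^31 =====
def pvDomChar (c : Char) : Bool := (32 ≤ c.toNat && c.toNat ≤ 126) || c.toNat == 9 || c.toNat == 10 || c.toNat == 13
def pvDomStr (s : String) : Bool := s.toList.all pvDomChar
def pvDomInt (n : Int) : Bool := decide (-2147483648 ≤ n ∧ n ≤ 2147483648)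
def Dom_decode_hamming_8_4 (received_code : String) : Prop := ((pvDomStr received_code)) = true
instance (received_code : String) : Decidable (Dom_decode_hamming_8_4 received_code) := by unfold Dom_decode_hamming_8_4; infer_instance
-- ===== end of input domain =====

-- B replaces A's nested per-parity-bit syndrome loops by the classic single pass that
-- XORs the (1-based) index of every '1' bit into the error position (objective: simpler).

-- ===== PORT A =====
-- ''.join(received_code[i-1] for i in [3,5,6,7]); pyGet? cannot miss here (len = 8)
def pvExtractA (cs : List Char) : String :=
  String.ofList ((([3, 5, 6, 7] : List Int)).map (fun i => (PySem.Chars.pyGet? cs (i - 1)).getD ' '))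

-- body of A on received_code as List Char; getD defaults are unreachable (guard ensures
-- len = 8 and bits '0'/'1', so pyGet?/ofChars?/ofCharsBase? always succeed)
def pvDecodeA (cs : List Char) : String :=
  if cs.length ≠ 8 ∨ cs.any (fun bit => !((['0', '1'] : List Char).contains bit)) then
    "Invalid code. Please provide 8 bits."
  else
    -- for p in [1,2,4,8]: inner loop over i in range(1,9); syndrome = str(parity) + syndrome
    let syndrome := (([1, 2, 4, 8] : List Int)).foldl (fun syn p =>
      let parity := (PySem.List.pyRange 1 9 1).foldl (fun parity i =>
        if PySem.Int.band i p ≠ 0 ∨ i = p then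
          PySem.Int.bxor parity ((PySem.Int.ofChars? [(PySem.Chars.pyGet? cs (i - 1)).getD ' ']).getD 0)
        else parity) 0
      PySem.Int.toChars parity ++ syn) []
    let error_position := (PySem.Int.ofCharsBase? syndrome 2).getD 0  -- int(syndrome, 2); syndrome is '0'/'1' digits
    if error_position ≠ 0 then
      if error_position > 8 then "Uncorrectable error detected"
      else
        -- corrected_code[error_position-1] flipped; 1 ≤ error_position ≤ 8 here so .toNat is exact
        let flipped : Char := if (PySem.Chars.pyGet? cs (error_position - 1)).getD ' ' = '0' then '1' else '0'
        pvExtractA (cs.set (error_position - 1).toNat flipped)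
    else
      pvExtractA cs

def decode_hamming_8_4 (received_code : String) : String := pvDecodeA received_code.toList

-- ===== PORT B =====
-- bits[2] + bits[4] + bits[5] + bits[6]; pyGet? cannot miss here (len = 8)
def pvExtractB (bits : List Char) : String :=
  String.ofList [(PySem.Chars.pyGet? bits 2).getD ' ', (PySem.Chars.pyGet? bits 4).getD ' ',
                 (PySem.Chars.pyGet? bits 5).getD ' ', (PySem.Chars.pyGet? bits 6).getD ' ']

-- body of B on received_code as List Char; 'bit not in "01"' is Chars.isIn
def pvDecodeB (cs : List Char) : String :=
  if cs.length ≠ 8 ∨ cs.any (fun bit => !(PySem.Chars.isIn [bit] ['0', '1'])) then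
    "Invalid code. Please provide 8 bits."
  else
    -- for i, bit in enumerate(received_code, 1): if bit == '1': error_position ^= i
    let e := (PySem.List.enumerate cs 1).foldl
      (fun e p => if p.2 = '1' then PySem.Int.bxor e p.1 else e) 0
    if e > 8 then "Uncorrectable error detected"
    else
      -- bits[e-1] flipped when e ≠ 0; 1 ≤ e ≤ 8 here so .toNat is exact
      let bits := if e ≠ 0 then
          cs.set (e - 1).toNat (if (PySem.Chars.pyGet? cs (e - 1)).getD ' ' = '1' then '0' else '1')
        else cs
      pvExtractB bits

def decode_hamming_8_4_alt (received_code : String) : String := pvDecodeB received_code.toList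

-- ===== PRECONDITION & SPEC =====
def Spec_decode_hamming_8_4 (received_code : String) (out : String) : Prop := out = decode_hamming_8_4_alt received_code
instance (received_code : String) (out : String) : Decidable (Spec_decode_hamming_8_4 received_code out) := by unfold Spec_decode_hamming_8_4; infer_instance

-- ===== CLAIM (what is proved, stated in full; the proofs are below) =====
def Claim_equal_decode_hamming_8_4 : Prop := ∀ (received_code : String), Dom_decode_hamming_8_4 received_code → Spec_decode_hamming_8_4 received_code (decode_hamming_8_4 received_code)

-- ===== LEMMAS AND PROOFS =====

-- single-char membership in "01" is just the two equality tests
theorem pvIsIn01 (c : Char) : PySem.Chars.isIn [c] ['0', '1'] = (c == '0' || c == '1') := by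
  have h := PySem.Chars.isIn_iff_infix [c] ['0', '1']
  have h2 : [c] <:+: ['0', '1'] ↔ c ∈ (['0', '1'] : List Char) := by
    constructor
    · intro hi; exact hi.mem (by simp)
    · intro hm
      rcases List.mem_cons.mp hm with hm | hm
      · subst hm; exact ⟨[], ['1'], rfl⟩
      · simp only [List.mem_singleton] at hm; subst hm; exact ⟨['0'], [], rfl⟩
  rcases Bool.eq_false_or_eq_true (c == '0' || c == '1') with hb | hb <;> rw [hb]
  · rw [h, h2]; simp at hb ⊢; tauto
  · rw [Bool.eq_false_iff, Ne, h, h2]; simp at hb ⊢; tauto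

-- the two validity guards agree
theorem pvGuardEq (cs : List Char) :
    cs.any (fun bit => !(PySem.Chars.isIn [bit] ['0', '1'])) =
    cs.any (fun bit => !((['0', '1'] : List Char).contains bit)) := by
  induction cs with
  | nil => rfl
  | cons c cs ih =>
    have hb : ∀ (a b : Char), (a == b) = decide (a = b) := fun a b => by
      by_cases h : a = b <;> simp [h]
    simp [List.any_cons, pvIsIn01, hb]

def pvBC (b : Bool) : Char := if b then '1' else '0'

-- the two decoders agree on every valid 8-bit codeword (256 cases)
theorem pvValid256 : ∀ b1 b2 b3 b4 b5 b6 b7 b8 : Bool,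
    pvDecodeA [pvBC b1, pvBC b2, pvBC b3, pvBC b4, pvBC b5, pvBC b6, pvBC b7, pvBC b8] =
    pvDecodeB [pvBC b1, pvBC b2, pvBC b3, pvBC b4, pvBC b5, pvBC b6, pvBC b7, pvBC b8] := by
  decide

theorem pvBitChar {c : Char} (h : c = '0' ∨ c = '1') : ∃ b, c = pvBC b := by
  rcases h with h | h
  · exact ⟨false, h⟩
  · exact ⟨true, h⟩

theorem pvDecodeEq (cs : List Char) : pvDecodeA cs = pvDecodeB cs := by
  by_cases hg : cs.length ≠ 8 ∨ cs.any (fun bit => !((['0', '1'] : List Char).contains bit)) = true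
  · have hg' : cs.length ≠ 8 ∨ cs.any (fun bit => !(PySem.Chars.isIn [bit] ['0', '1'])) = true := by
      rwa [pvGuardEq]
    unfold pvDecodeA pvDecodeB
    rw [if_pos hg, if_pos hg']
  · push Not at hg
    obtain ⟨hlen, hall⟩ := hg
    have hall' : ∀ c ∈ cs, c = '0' ∨ c = '1' := by
      intro c hc
      have := List.any_eq_false.mp (Bool.eq_false_iff.mpr hall) c hc
      simp at this
      exact or_iff_not_imp_left.mpr this
    match cs, hlen with
    | [c1, c2, c3, c4, c5, c6, c7, c8], _ =>
      obtain ⟨b1, rfl⟩ := pvBitChar (hall' c1 (by simp))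
      obtain ⟨b2, rfl⟩ := pvBitChar (hall' c2 (by simp))
      obtain ⟨b3, rfl⟩ := pvBitChar (hall' c3 (by simp))
      obtain ⟨b4, rfl⟩ := pvBitChar (hall' c4 (by simp))
      obtain ⟨b5, rfl⟩ := pvBitChar (hall' c5 (by simp))
      obtain ⟨b6, rfl⟩ := pvBitChar (hall' c6 (by simp))
      obtain ⟨b7, rfl⟩ := pvBitChar (hall' c7 (by simp))
      obtain ⟨b8, rfl⟩ := pvBitChar (hall' c8 (by simp))
      exact pvValid256 b1 b2 b3 b4 b5 b6 b7 b8

-- ===== VERDICT (by name: the statement is the Claim_ definition above) =====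
theorem decode_hamming_8_4_spec : Claim_equal_decode_hamming_8_4 := by
  intro s _
  unfold Spec_decode_hamming_8_4 decode_hamming_8_4 decode_hamming_8_4_alt
  exact pvDecodeEq s.toList
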